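-- pv_equiv track=rewrite | github.com/HamzaQahoush/Problem-Solving | matrixElementsSum.py | solution
-- ===== SOURCE A (Python) =====
-- def solution(matrix):
--     rows=len(matrix) # 1,2,3
--     cols = len(matrix[0]) #4
--     s=set()
--     r=0
--     for i in range(rows):
--         for j in  range (cols):
--             if matrix[i][j] ==0  :
--                 s.add(j)
--             elif matrix[i][j] > 0 and j not in s:
--                 r+=matrix[i][j]
--     return r
-- ===== SOURCE B (Python) =====
-- def solution(matrix):
--     rows = len(matrix)
--     cols = len(matrix[0])
--     total = 0
--     for j in range(cols):
--         for i in range(rows):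
--             v = matrix[i][j]
--             if v == 0:
--                 break
--             if v > 0:
--                 total += v
--     return total
-- ===== Notes on version B (the rewrite author's own statement) =====
-- stated objective: simpler
-- what changed: Column-major traversal with per-column early break on the first zero replaces the row-major scan that maintains a 'dead columns' set.
import Mathlib
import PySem

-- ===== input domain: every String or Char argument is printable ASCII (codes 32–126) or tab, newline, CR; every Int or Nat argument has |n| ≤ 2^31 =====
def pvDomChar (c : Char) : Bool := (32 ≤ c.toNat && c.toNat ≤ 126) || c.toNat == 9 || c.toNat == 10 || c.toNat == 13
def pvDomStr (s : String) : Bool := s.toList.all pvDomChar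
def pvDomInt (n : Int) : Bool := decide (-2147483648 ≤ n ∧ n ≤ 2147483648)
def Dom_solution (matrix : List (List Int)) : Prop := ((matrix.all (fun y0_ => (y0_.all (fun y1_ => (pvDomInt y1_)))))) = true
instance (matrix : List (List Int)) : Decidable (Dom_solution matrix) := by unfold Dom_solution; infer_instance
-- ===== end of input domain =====

-- B replaces A's row-major scan with a dead-column set by a column-major scan that breaks
-- each column at its first zero; the objective is a simpler, set-free implementation.

-- ===== PORT A =====
def solution (matrix : List (List Int)) : Int :=
  let rows : Int := matrix.length
  let cols : Int := ((PySem.List.pyGetD matrix 0 []).length : Int)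
  let res : PySem.Set Int × Int :=
    (PySem.List.pyRange 0 rows 1).foldl (fun st i =>
      (PySem.List.pyRange 0 cols 1).foldl (fun st j =>
        let v := PySem.List.pyGetD (PySem.List.pyGetD matrix i []) j 0
        if v = 0 then (PySem.Set.add st.1 j, st.2)
        else if 0 < v ∧ j ∉ st.1 then (st.1, st.2 + v)
        else st) st)
      (PySem.Set.empty, 0)
  res.2

-- ===== PORT B =====
-- inner 'for i in range(rows): … break …' of Source B (break = stop recursion)
def colLoop (matrix : List (List Int)) (j : Int) : List Int → Int → Int
  | [], total => total
  | i :: rest, total =>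
    let v := PySem.List.pyGetD (PySem.List.pyGetD matrix i []) j 0
    if v = 0 then total
    else colLoop matrix j rest (if 0 < v then total + v else total)

def solution_alt (matrix : List (List Int)) : Int :=
  let rows : Int := matrix.length
  let cols : Int := ((PySem.List.pyGetD matrix 0 []).length : Int)
  (PySem.List.pyRange 0 cols 1).foldl
    (fun total j => colLoop matrix j (PySem.List.pyRange 0 rows 1) total) 0

-- ===== PRECONDITION & SPEC =====
-- Pre_ excludes exactly the inputs where the Python A raises IndexError: the empty matrix
-- (len(matrix[0])) and ragged matrices with a row shorter than row 0 (matrix[i][j] lookup).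
def Pre_solution (matrix : List (List Int)) : Prop :=
  matrix ≠ [] ∧ ∀ row ∈ matrix, (matrix.headD []).length ≤ row.length
instance (matrix : List (List Int)) : Decidable (Pre_solution matrix) := by
  unfold Pre_solution; infer_instance
def pvWitness_solution : List (List Int) := [[1, 0], [-2, 3]]
def Spec_solution (matrix : List (List Int)) (out : Int) : Prop := out = solution_alt matrix
instance (matrix : List (List Int)) (out : Int) : Decidable (Spec_solution matrix out) := by
  unfold Spec_solution; infer_instance

-- ===== CLAIM (what is proved, stated in full; the proofs are below) =====
def Claim_equal_solution : Prop :=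
  ∀ (matrix : List (List Int)), Dom_solution matrix → Pre_solution matrix →
    Spec_solution matrix (solution matrix)

-- ===== LEMMAS AND PROOFS =====

-- the value A and B read at (row i, column j); 0 outside (both ports read via getD)
def rd (m : List (List Int)) (i j : Nat) : Int := (m.getD i []).getD j 0

-- contribution of cell (i, j): counted iff positive and no zero above it in its column
def g (m : List (List Int)) (i j : Nat) : Int :=
  if 0 < rd m i j ∧ (∀ i' < i, rd m i' j ≠ 0) then rd m i j else 0

-- sum of positives before the first zero of a column, as B computes it
def colSum : List Int → Int
  | [] => 0
  | v :: vs => if v = 0 then 0 else (if 0 < v then v else 0) + colSum vs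

theorem sum_map_range_eq (f : Nat → Int) (n : Nat) :
    ((List.range n).map f).sum = ∑ i ∈ Finset.range n, f i := by
  induction n with
  | zero => simp
  | succ n ih => simp [List.range_succ, Finset.sum_range_succ, ih]

theorem colLoop_eq (m : List (List Int)) (j : Int) (is : List Int) :
    ∀ total, colLoop m j is total
      = total + colSum (is.map (fun i => PySem.List.pyGetD (PySem.List.pyGetD m i []) j 0)) := by
  induction is with
  | nil => intro total; simp [colLoop, colSum]
  | cons i rest ih =>
      intro total
      by_cases h0 : PySem.List.pyGetD (PySem.List.pyGetD m i []) j 0 = 0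
      · simp [colLoop, colSum, h0]
      · by_cases hp : 0 < PySem.List.pyGetD (PySem.List.pyGetD m i []) j 0
        · simp [colLoop, colSum, h0, hp, ih]; ring
        · simp [colLoop, colSum, h0, hp, ih]

theorem colSum_eq_sum (vs : List Int) :
    colSum vs = ∑ i ∈ Finset.range vs.length,
      (if 0 < vs.getD i 0 ∧ (∀ i' < i, vs.getD i' 0 ≠ 0) then vs.getD i 0 else 0) := by
  induction vs with
  | nil => simp [colSum]
  | cons v vs ih =>
      by_cases h0 : v = 0
      · subst h0
        rw [colSum]
        refine (Finset.sum_eq_zero ?_).symm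
        intro i _
        match i with
        | 0 => simp
        | Nat.succ k =>
            rw [if_neg]
            rintro ⟨-, hall⟩
            exact hall 0 (Nat.succ_pos k) (by simp)
      · rw [colSum, if_neg h0]
        rw [List.length_cons, Finset.sum_range_succ']
        have hshift : ∀ i : Nat,
            (if 0 < (v :: vs).getD (i+1) 0 ∧ (∀ i' < i + 1, (v :: vs).getD i' 0 ≠ 0)
              then (v :: vs).getD (i+1) 0 else 0)
            = (if 0 < vs.getD i 0 ∧ (∀ i' < i, vs.getD i' 0 ≠ 0) then vs.getD i 0 else 0) := by
          intro i
          have hcond : (0 < (v :: vs).getD (i+1) 0 ∧ (∀ i' < i + 1, (v :: vs).getD i' 0 ≠ 0))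
              ↔ (0 < vs.getD i 0 ∧ (∀ i' < i, vs.getD i' 0 ≠ 0)) := by
            simp only [List.getD_cons_succ]
            constructor
            · rintro ⟨hpos, hall⟩
              exact ⟨hpos, fun i' hi' => by
                have := hall (i'+1) (by omega); simpa using this⟩
            · rintro ⟨hpos, hall⟩
              refine ⟨hpos, fun i' hi' => ?_⟩
              match i' with
              | 0 => simpa using h0
              | Nat.succ k => simpa using hall k (by omega)
          by_cases hc : 0 < vs.getD i 0 ∧ (∀ i' < i, vs.getD i' 0 ≠ 0)
          · rw [if_pos (hcond.mpr hc), if_pos hc, List.getD_cons_succ]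
          · rw [if_neg (fun h => hc (hcond.mp h)), if_neg hc]
        simp only [hshift]
        rw [ih, add_comm]
        congr 1
        simp

-- ===== A-side: characterisation of the inner (per-row) loop =====
theorem inner_char (f : Int → Int) :
    ∀ (js : List Int), js.Nodup → ∀ (s : PySem.Set Int) (r : Int),
      (js.foldl (fun st j =>
          if f j = 0 then (PySem.Set.add st.1 j, st.2)
          else if 0 < f j ∧ j ∉ st.1 then (st.1, st.2 + f j)
          else st) (s, r))
      = (((js.foldl (fun st j =>
          if f j = 0 then (PySem.Set.add st.1 j, st.2)
          else if 0 < f j ∧ j ∉ st.1 then (st.1, st.2 + f j)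
          else st) (s, r))).1,
         r + (js.map (fun j => if 0 < f j ∧ j ∉ s then f j else 0)).sum)
      ∧ (∀ x, x ∈ (js.foldl (fun st j =>
          if f j = 0 then (PySem.Set.add st.1 j, st.2)
          else if 0 < f j ∧ j ∉ st.1 then (st.1, st.2 + f j)
          else st) (s, r)).1 ↔ x ∈ s ∨ (x ∈ js ∧ f x = 0)) := by
  intro js
  induction js with
  | nil => intro _ s r; simp
  | cons j rest ih =>
      intro hnd s r
      have hj : j ∉ rest := (List.nodup_cons.mp hnd).1
      have hrest : rest.Nodup := (List.nodup_cons.mp hnd).2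
      by_cases h0 : f j = 0
      · simp only [List.foldl_cons, if_pos h0, List.map_cons, List.sum_cons]
        obtain ⟨hsum, hmem⟩ := ih hrest (PySem.Set.add s j) r
        constructor
        · rw [hsum]
          have : (rest.map (fun j' => if 0 < f j' ∧ j' ∉ PySem.Set.add s j then f j' else 0))
              = rest.map (fun j' => if 0 < f j' ∧ j' ∉ s then f j' else 0) := by
            refine List.map_congr_left (fun j' hj' => ?_)
            have hne : j' ≠ j := fun h => hj (h ▸ hj')
            have : (j' ∈ PySem.Set.add s j) ↔ j' ∈ s := by
              rw [PySem.Set.mem_add]; exact or_iff_left hne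
            simp only [this]
          rw [this]
          have : ¬ (0 < f j ∧ j ∉ s) := by rw [h0]; simp
          rw [if_neg this]; simp
        · intro x
          rw [hmem x, PySem.Set.mem_add]
          constructor
          · rintro (((hx | rfl) | ⟨hx, hfx⟩))
            · exact Or.inl hx
            · exact Or.inr ⟨List.mem_cons_self .., h0⟩
            · exact Or.inr ⟨List.mem_cons_of_mem _ hx, hfx⟩
          · rintro (hx | ⟨hx, hfx⟩)
            · exact Or.inl (Or.inl hx)
            · rcases List.mem_cons.mp hx with rfl | hx
              · exact Or.inl (Or.inr rfl)
              · exact Or.inr ⟨hx, hfx⟩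
      · by_cases hp : 0 < f j ∧ j ∉ s
        · simp only [List.foldl_cons, if_neg h0, if_pos hp, List.map_cons, List.sum_cons]
          obtain ⟨hsum, hmem⟩ := ih hrest s (r + f j)
          constructor
          · rw [hsum]
            simp only [Prod.mk.injEq]
            exact ⟨trivial, by ring⟩
          · intro x
            rw [hmem x]
            constructor
            · rintro (hx | ⟨hx, hfx⟩)
              · exact Or.inl hx
              · exact Or.inr ⟨List.mem_cons_of_mem _ hx, hfx⟩
            · rintro (hx | ⟨hx, hfx⟩)
              · exact Or.inl hx
              · rcases List.mem_cons.mp hx with rfl | hx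
                · exact absurd hfx h0
                · exact Or.inr ⟨hx, hfx⟩
        · simp only [List.foldl_cons, if_neg h0, if_neg hp, List.map_cons, List.sum_cons]
          obtain ⟨hsum, hmem⟩ := ih hrest s r
          constructor
          · rw [hsum]
            simp only [Prod.mk.injEq]
            exact ⟨trivial, by ring⟩
          · intro x
            rw [hmem x]
            constructor
            · rintro (hx | ⟨hx, hfx⟩)
              · exact Or.inl hx
              · exact Or.inr ⟨List.mem_cons_of_mem _ hx, hfx⟩
            · rintro (hx | ⟨hx, hfx⟩)
              · exact Or.inl hx
              · rcases List.mem_cons.mp hx with rfl | hx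
                · exact absurd hfx h0
                · exact Or.inr ⟨hx, hfx⟩

def colsN (m : List (List Int)) : Nat := (PySem.List.pyGetD m 0 []).length

-- A's inner loop body as a named function, to state the outer-loop invariant
def stepA (m : List (List Int)) (st : PySem.Set Int × Int) (i : Int) : PySem.Set Int × Int :=
  (PySem.List.pyRange 0 ((PySem.List.pyGetD m 0 []).length : Int) 1).foldl (fun st j =>
    if PySem.List.pyGetD (PySem.List.pyGetD m i []) j 0 = 0 then (PySem.Set.add st.1 j, st.2)
    else if 0 < PySem.List.pyGetD (PySem.List.pyGetD m i []) j 0 ∧ j ∉ st.1 then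
      (st.1, st.2 + PySem.List.pyGetD (PySem.List.pyGetD m i []) j 0)
    else st) st

theorem outerA (m : List (List Int)) : ∀ n : Nat,
    ((PySem.List.pyRange 0 (n : Int) 1).foldl (stepA m) (PySem.Set.empty, 0)).2
      = ∑ i ∈ Finset.range n, ∑ j ∈ Finset.range (colsN m), g m i j
    ∧ ∀ x : Int, (x ∈ ((PySem.List.pyRange 0 (n : Int) 1).foldl (stepA m) (PySem.Set.empty, 0)).1
        ↔ ∃ jN < colsN m, x = (jN : Int) ∧ ∃ i < n, rd m i jN = 0) := by
  intro n
  induction n with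
  | zero =>
      rw [PySem.List.pyRange_one_eq_nil (by norm_num)]
      simp [PySem.Set.empty]
  | succ n ih =>
      obtain ⟨ihsum, ihmem⟩ := ih
      have hcast : ((n + 1 : Nat) : Int) = (n : Int) + 1 := by push_cast; ring
      rw [hcast, PySem.List.pyRange_one_succ_right (Int.natCast_nonneg n), List.foldl_append,
        List.foldl_cons, List.foldl_nil]
      set stn := (PySem.List.pyRange 0 (n : Int) 1).foldl (stepA m) (PySem.Set.empty, 0) with hstn
      have hnd : (PySem.List.pyRange 0 ((PySem.List.pyGetD m 0 []).length : Int) 1).Nodup :=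
        PySem.List.nodup_pyRange_one _ _
      obtain ⟨hsum, hmem⟩ :=
        inner_char (fun j => PySem.List.pyGetD (PySem.List.pyGetD m (n : Int) []) j 0)
          (PySem.List.pyRange 0 ((PySem.List.pyGetD m 0 []).length : Int) 1) hnd stn.1 stn.2
      have hstep : stepA m stn (n : Int)
          = (PySem.List.pyRange 0 ((PySem.List.pyGetD m 0 []).length : Int) 1).foldl (fun st j =>
              if PySem.List.pyGetD (PySem.List.pyGetD m (n : Int) []) j 0 = 0 then
                (PySem.Set.add st.1 j, st.2)
              else if 0 < PySem.List.pyGetD (PySem.List.pyGetD m (n : Int) []) j 0 ∧ j ∉ st.1 then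
                (st.1, st.2 + PySem.List.pyGetD (PySem.List.pyGetD m (n : Int) []) j 0)
              else st) (stn.1, stn.2) := by
        rw [stepA, Prod.mk.eta]
      have hrange : PySem.List.pyRange 0 ((PySem.List.pyGetD m 0 []).length : Int) 1
          = (List.range (colsN m)).map (fun k : Nat => (k : Int)) := by
        rw [PySem.List.pyRange_zero_nat]; rfl
      have hf : ∀ jN : Nat,
          PySem.List.pyGetD (PySem.List.pyGetD m (n : Int) []) (jN : Int) 0 = rd m n jN := by
        intro jN; simp [rd]
      have hmemiff : ∀ jN : Nat, jN < colsN m →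
          (((jN : Nat) : Int) ∈ stn.1 ↔ ∃ i < n, rd m i jN = 0) := by
        intro jN hlt
        rw [ihmem]
        constructor
        · rintro ⟨j', _, hcasteq, hex⟩
          have : jN = j' := by exact_mod_cast hcasteq
          exact this ▸ hex
        · intro hex; exact ⟨jN, hlt, rfl, hex⟩
      constructor
      · rw [hstep, hsum]
        rw [ihsum, Finset.sum_range_succ]
        rw [hrange, List.map_map]
        have hterm : ∀ jN ∈ List.range (colsN m),
            ((fun j => if 0 < PySem.List.pyGetD (PySem.List.pyGetD m (n : Int) []) j 0 ∧ j ∉ stn.1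
                then PySem.List.pyGetD (PySem.List.pyGetD m (n : Int) []) j 0 else 0) ∘
              (fun k : Nat => (k : Int))) jN = g m n jN := by
          intro jN hjN
          have hlt := List.mem_range.mp hjN
          simp only [Function.comp_apply, hf]
          have hcond : (0 < rd m n jN ∧ ((jN : Nat) : Int) ∉ stn.1)
              ↔ (0 < rd m n jN ∧ ∀ i' < n, rd m i' jN ≠ 0) := by
            rw [hmemiff jN hlt]; push_neg; rfl
          rw [g, if_congr hcond rfl rfl]
        rw [List.map_congr_left hterm, sum_map_range_eq]
      · intro x
        rw [hstep, hmem, ihmem, hrange]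
        constructor
        · rintro (⟨jN, hlt, rfl, i, hi, hz⟩ | ⟨hxin, hfx⟩)
          · exact ⟨jN, hlt, rfl, i, by omega, hz⟩
          · obtain ⟨jN, hjN, rfl⟩ := List.mem_map.mp hxin
            refine ⟨jN, List.mem_range.mp hjN, rfl, n, by omega, ?_⟩
            rw [← hf jN]; exact hfx
        · rintro ⟨jN, hlt, rfl, i, hi, hz⟩
          by_cases hin : i < n
          · exact Or.inl ⟨jN, hlt, rfl, i, hin, hz⟩
          · have : i = n := by omega
            subst this
            refine Or.inr ⟨List.mem_map.mpr ⟨jN, List.mem_range.mpr hlt, rfl⟩, ?_⟩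
            rw [hf jN]; exact hz

theorem solution_eq_sum (m : List (List Int)) :
    solution m = ∑ i ∈ Finset.range m.length,
      ∑ j ∈ Finset.range (colsN m), g m i j := by
  have h : solution m
      = ((PySem.List.pyRange 0 ((m.length : Nat) : Int) 1).foldl (stepA m) (PySem.Set.empty, 0)).2 := rfl
  rw [h, (outerA m m.length).1]

theorem foldl_colLoop (m : List (List Int)) (idxs : List Int) :
    ∀ (js : List Int) (t : Int),
      js.foldl (fun total j => colLoop m j idxs total) t
        = t + (js.map (fun j =>
            colSum (idxs.map (fun i => PySem.List.pyGetD (PySem.List.pyGetD m i []) j 0)))).sum := by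
  intro js
  induction js with
  | nil => intro t; simp
  | cons j rest ih =>
      intro t
      rw [List.foldl_cons, colLoop_eq, ih, List.map_cons, List.sum_cons]
      ring

theorem solution_alt_eq_sum (m : List (List Int)) :
    solution_alt m = ∑ j ∈ Finset.range (colsN m),
      ∑ i ∈ Finset.range m.length, g m i j := by
  rw [solution_alt]
  rw [foldl_colLoop]
  have hcols : PySem.List.pyRange 0 ((PySem.List.pyGetD m 0 []).length : Int) 1
      = (List.range (colsN m)).map (fun k : Nat => (k : Int)) := by
    rw [PySem.List.pyRange_zero_nat]; rfl
  rw [hcols, List.map_map, zero_add]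
  have hcol : ∀ (j : Nat) (i : Nat),
      (m.map (fun row => row.getD j 0)).getD i 0 = rd m i j := by
    intro j i
    rw [rd]
    simp only [List.getD_eq_getElem?_getD, List.getElem?_map]
    cases h : m[i]? <;> simp
  have hterm : ∀ jN ∈ List.range (colsN m),
      ((fun j => colSum (((PySem.List.pyRange 0 ((m.length : Nat) : Int) 1)).map
          (fun i => PySem.List.pyGetD (PySem.List.pyGetD m i []) j 0))) ∘
        (fun k : Nat => (k : Int))) jN
      = ∑ i ∈ Finset.range m.length, g m i jN := by
    intro jN hjN
    simp only [Function.comp_apply]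
    have hrowmap : (PySem.List.pyRange 0 ((m.length : Nat) : Int) 1).map
        (fun i => PySem.List.pyGetD (PySem.List.pyGetD m i []) (jN : Int) 0)
        = m.map (fun row => row.getD jN 0) := by
      have : (fun i => PySem.List.pyGetD (PySem.List.pyGetD m i []) (jN : Int) 0)
          = (fun row => PySem.List.pyGetD row (jN : Int) 0) ∘ (fun i => PySem.List.pyGetD m i []) := rfl
      rw [this, ← List.map_map, PySem.List.map_pyGetD_pyRange_zero']
      exact List.map_congr_left (fun row _ => by simp)
    rw [hrowmap, colSum_eq_sum]
    have hlen : (m.map (fun row => row.getD jN 0)).length = m.length := by simp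
    rw [hlen]
    refine Finset.sum_congr rfl (fun i _ => ?_)
    have hcond : (0 < (m.map (fun row => row.getD jN 0)).getD i 0
          ∧ ∀ i' < i, (m.map (fun row => row.getD jN 0)).getD i' 0 ≠ 0)
        ↔ (0 < rd m i jN ∧ ∀ i' < i, rd m i' jN ≠ 0) := by
      constructor
      · rintro ⟨h1, h2⟩
        exact ⟨hcol jN i ▸ h1, fun i' hi' => hcol jN i' ▸ h2 i' hi'⟩
      · rintro ⟨h1, h2⟩
        exact ⟨(hcol jN i).symm ▸ h1, fun i' hi' => (hcol jN i').symm ▸ h2 i' hi'⟩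
    rw [g, if_congr hcond (hcol jN i) rfl]
  rw [List.map_congr_left hterm, sum_map_range_eq]

-- ===== VERDICT (by name: the statement is the Claim_ definition above) =====
theorem solution_spec : Claim_equal_solution := by
  intro m _ _
  unfold Spec_solution
  rw [solution_eq_sum, solution_alt_eq_sum, Finset.sum_comm]
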